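-- pv_equiv track=rewrite | github.com/apassuello/crossword-helper | cli/src/core/scoring.py | analyze_letters
-- ===== SOURCE A (Python) =====
-- COMMON_LETTERS = set("EARIOTNS")
--
-- UNCOMMON_LETTERS = set("JQXZ")
--
-- def analyze_letters(word: str) -> dict:
--     """
--     Analyze letter quality distribution for a word.
--
--     Args:
--         word: Word to analyze (should be uppercase)
--
--     Returns:
--         Dictionary with letter counts:
--         {
--             'common': count of E/A/R/I/O/T/N/S,
--             'uncommon': count of J/Q/X/Z,
--             'regular': count of other letters
--         }
--
--     Example:
--         >>> analyze_letters('QUIZ')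
--         {'common': 1, 'uncommon': 2, 'regular': 1}
--     """
--     word = word.upper()
--
--     common_count = sum(1 for c in word if c in COMMON_LETTERS)
--     uncommon_count = sum(1 for c in word if c in UNCOMMON_LETTERS)
--     regular_count = len(word) - common_count - uncommon_count
--
--     return {
--         "common": common_count,
--         "uncommon": uncommon_count,
--         "regular": regular_count,
--     }
-- ===== SOURCE B (Python) =====
-- COMMON_LETTERS = set("EARIOTNS")
--
-- UNCOMMON_LETTERS = set("JQXZ")
--
-- def analyze_letters(word: str) -> dict:
--     common = uncommon = regular = 0
--     for c in word.upper():
--         if c in COMMON_LETTERS: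
--             common += 1
--         elif c in UNCOMMON_LETTERS:
--             uncommon += 1
--         else:
--             regular += 1
--     return {"common": common, "uncommon": uncommon, "regular": regular}
-- ===== Notes on version B (the rewrite author's own statement) =====
-- stated objective: simpler
-- what changed: B makes a single pass with an if/elif/else branch per character, incrementing the third counter directly, instead of A's two separate comprehension passes plus a len-subtraction.
import Mathlib
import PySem

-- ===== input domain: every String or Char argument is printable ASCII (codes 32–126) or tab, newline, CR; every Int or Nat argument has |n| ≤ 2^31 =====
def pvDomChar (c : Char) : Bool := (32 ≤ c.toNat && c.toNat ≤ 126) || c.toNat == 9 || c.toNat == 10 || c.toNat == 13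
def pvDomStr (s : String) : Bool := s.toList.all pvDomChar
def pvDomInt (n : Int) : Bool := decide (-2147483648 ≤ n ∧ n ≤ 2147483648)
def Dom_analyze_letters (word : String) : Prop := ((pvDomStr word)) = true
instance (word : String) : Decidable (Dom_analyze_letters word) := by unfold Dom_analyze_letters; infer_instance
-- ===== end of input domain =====

-- B: one pass with an if/elif/else per character (counting 'regular' directly) instead of A's two comprehension passes plus len-subtraction; objective: simpler.

-- ===== PORT A =====
def COMMON_LETTERS : PySem.Set Char := PySem.Set.ofList "EARIOTNS".toList
def UNCOMMON_LETTERS : PySem.Set Char := PySem.Set.ofList "JQXZ".toList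

def analyze_letters (word : String) : List (String × Int) :=
  let w := (PySem.Str.upper word).toList
  let common_count : Int := (w.map (fun c => if PySem.Set.contains COMMON_LETTERS c then (1 : Int) else 0)).sum
  let uncommon_count : Int := (w.map (fun c => if PySem.Set.contains UNCOMMON_LETTERS c then (1 : Int) else 0)).sum
  let regular_count : Int := (w.length : Int) - common_count - uncommon_count
  [("common", common_count), ("uncommon", uncommon_count), ("regular", regular_count)]

-- ===== PORT B =====
def analyze_letters_alt (word : String) : List (String × Int) :=
  let acc := (PySem.Str.upper word).toList.foldl
    (fun (t : Int × Int × Int) c =>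
      if PySem.Set.contains COMMON_LETTERS c then (t.1 + 1, t.2.1, t.2.2)
      else if PySem.Set.contains UNCOMMON_LETTERS c then (t.1, t.2.1 + 1, t.2.2)
      else (t.1, t.2.1, t.2.2 + 1))
    (0, 0, 0)
  [("common", acc.1), ("uncommon", acc.2.1), ("regular", acc.2.2)]

-- ===== PRECONDITION & SPEC =====
def Spec_analyze_letters (word : String) (out : List (String × Int)) : Prop := out = analyze_letters_alt word
instance (word : String) (out : List (String × Int)) : Decidable (Spec_analyze_letters word out) := by unfold Spec_analyze_letters; infer_instance

-- ===== CLAIM (what is proved, stated in full; the proofs are below) =====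
def Claim_equal_analyze_letters : Prop := ∀ (word : String), Dom_analyze_letters word → Spec_analyze_letters word (analyze_letters word)

-- ===== LEMMAS AND PROOFS =====

-- No character is in both literal letter sets.
theorem pv_not_both (c : Char) (h1 : PySem.Set.contains COMMON_LETTERS c = true)
    (h2 : PySem.Set.contains UNCOMMON_LETTERS c = true) : False := by
  simp [COMMON_LETTERS, UNCOMMON_LETTERS, PySem.Set.contains, PySem.Set.ofList] at h1 h2
  rcases h1 with h|h|h|h|h|h|h|h <;> subst h <;> simp_all

-- B's fold, characterised: each component is what A computes over the same list.
theorem pv_fold_char (l : List Char) (a b r : Int) :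
    l.foldl
      (fun (t : Int × Int × Int) c =>
        if PySem.Set.contains COMMON_LETTERS c then (t.1 + 1, t.2.1, t.2.2)
        else if PySem.Set.contains UNCOMMON_LETTERS c then (t.1, t.2.1 + 1, t.2.2)
        else (t.1, t.2.1, t.2.2 + 1))
      (a, b, r)
    = (a + (l.map (fun c => if PySem.Set.contains COMMON_LETTERS c then (1 : Int) else 0)).sum,
       b + (l.map (fun c => if PySem.Set.contains UNCOMMON_LETTERS c then (1 : Int) else 0)).sum,
       r + ((l.length : Int)
            - (l.map (fun c => if PySem.Set.contains COMMON_LETTERS c then (1 : Int) else 0)).sum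
            - (l.map (fun c => if PySem.Set.contains UNCOMMON_LETTERS c then (1 : Int) else 0)).sum)) := by
  induction l generalizing a b r with
  | nil => simp
  | cons c cs ih =>
    rw [List.foldl_cons]
    simp only [List.map_cons, List.sum_cons, List.length_cons]
    split_ifs with h1 h2 <;>
      first
      | exact absurd ‹_› (fun h => pv_not_both c ‹_› h)
      | (rw [ih]; refine Prod.ext ?_ (Prod.ext ?_ ?_) <;> (simp only; push_cast; ring))

-- ===== VERDICT (by name: the statement is the Claim_ definition above) =====
theorem analyze_letters_spec : Claim_equal_analyze_letters := by
  intro word _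
  unfold Spec_analyze_letters analyze_letters analyze_letters_alt
  simp only []
  rw [pv_fold_char]
  simp
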